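-- pv_equiv track=rewrite | github.com/jae961217/Coding_Programmers | py/기능개발.py | solution
-- ===== SOURCE A (Python) =====
-- from collections import deque
--
-- def solution(progresses, speeds):
--     answer = []
--     tmp = deque([])
--
--     for i in range(len(progresses)):
--         value, m = divmod((100 - progresses[i]), speeds[i])
--         if m == 0:
--             tmp.append(value)
--         else:
--             tmp.append(value + 1)
--
--     while tmp:
--         cnt = 1
--         value = tmp[0]
--         for i in range(1, len(tmp)):
--             if value < tmp[i]:
--                 break
--             cnt += 1
--         answer.append(cnt)
--         for i in range(cnt):
--             tmp.popleft()
--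
--     return answer
-- ===== SOURCE B (Python) =====
-- def solution(progresses, speeds):
--     days = [-(-(100 - p) // s) for p, s in zip(progresses, speeds)]
--     if not days:
--         return []
--     answer = []
--     front = days[0]
--     count = 1
--     for d in days[1:]:
--         if d <= front:
--             count += 1
--         else:
--             answer.append(count)
--             front, count = d, 1
--     answer.append(count)
--     return answer
-- ===== Notes on version B (the rewrite author's own statement) =====
-- stated objective: faster
-- what changed: Replaces the deque with repeated rescan-from-front and popleft grouping by a precomputed ceil-days list (integer ceil via -(-x//s)) and one linear forward pass maintaining the current dominating front and a running count.
import Mathlib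
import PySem

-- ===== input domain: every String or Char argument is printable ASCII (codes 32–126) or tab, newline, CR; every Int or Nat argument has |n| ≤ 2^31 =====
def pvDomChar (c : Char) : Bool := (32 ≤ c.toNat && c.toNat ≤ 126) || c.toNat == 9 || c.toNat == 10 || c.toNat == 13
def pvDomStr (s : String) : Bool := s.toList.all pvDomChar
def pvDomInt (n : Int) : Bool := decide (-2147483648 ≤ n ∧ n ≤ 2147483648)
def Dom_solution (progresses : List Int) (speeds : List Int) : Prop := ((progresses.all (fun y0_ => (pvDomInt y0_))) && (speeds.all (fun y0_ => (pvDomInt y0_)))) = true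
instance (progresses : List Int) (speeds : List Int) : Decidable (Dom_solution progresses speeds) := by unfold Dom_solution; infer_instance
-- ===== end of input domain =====

-- B replaces A's deque rescan-and-popleft grouping by a ceil-days list plus one linear pass (simpler).

-- ===== PORT A =====
-- inner 'for i in range(1, len(tmp)): if value < tmp[i]: break; cnt += 1' counted over the tail
def cntLoop (value : Int) (rest : List Int) : Nat :=
  match rest with
  | [] => 0
  | x :: xs => if value < x then 0 else 1 + cntLoop value xs

-- the 'while tmp:' loop of A (popleft cnt times = drop cnt)
def whileLoopA (tmp : List Int) : List Int :=
  match tmp with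
  | [] => []
  | v :: rest =>
    let cnt : Nat := 1 + cntLoop v rest
    (cnt : Int) :: whileLoopA ((v :: rest).drop cnt)
termination_by tmp.length
decreasing_by
  simp only [List.length_cons, List.length_drop]
  omega

def solution (progresses : List Int) (speeds : List Int) : List Int :=
  let tmp := (PySem.List.pyRange 0 (progresses.length : Int) 1).foldl
    (fun tmp i =>
      let vm := (PySem.Int.divmod? (100 - PySem.List.pyGetD progresses i 0)
                  (PySem.List.pyGetD speeds i 0)).getD (0, 0)
      if vm.2 = 0 then tmp ++ [vm.1] else tmp ++ [vm.1 + 1]) []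
  whileLoopA tmp

-- ===== PORT B =====
def daysB (progresses : List Int) (speeds : List Int) : List Int :=
  (progresses.zip speeds).map (fun ps => -(PySem.Int.floordiv (-(100 - ps.1)) ps.2))

def groupB (front : Int) (count : Int) (rest : List Int) (acc : List Int) : List Int :=
  match rest with
  | [] => acc ++ [count]
  | d :: ds =>
    if d ≤ front then groupB front (count + 1) ds acc
    else groupB d 1 ds (acc ++ [count])

def solution_alt (progresses : List Int) (speeds : List Int) : List Int :=
  match daysB progresses speeds with
  | [] => []
  | f :: rest => groupB f 1 rest []

-- ===== PRECONDITION & SPEC =====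
-- Pre_ excludes inputs where A raises: speeds shorter than progresses (IndexError) or a used speed of 0 (ZeroDivisionError).
def Pre_solution (progresses : List Int) (speeds : List Int) : Prop :=
  progresses.length ≤ speeds.length ∧ ∀ s ∈ speeds.take progresses.length, s ≠ 0
instance (progresses : List Int) (speeds : List Int) : Decidable (Pre_solution progresses speeds) := by unfold Pre_solution; infer_instance
def pvWitness_solution : List Int × List Int := ([93, 30, 55], [1, 30, 5])

def Spec_solution (progresses : List Int) (speeds : List Int) (out : List Int) : Prop := out = solution_alt progresses speeds
instance (progresses : List Int) (speeds : List Int) (out : List Int) : Decidable (Spec_solution progresses speeds out) := by unfold Spec_solution; infer_instance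

-- ===== CLAIM (what is proved, stated in full; the proofs are below) =====
def Claim_equal_solution : Prop := ∀ (progresses : List Int) (speeds : List Int), Dom_solution progresses speeds → Pre_solution progresses speeds → Spec_solution progresses speeds (solution progresses speeds)

-- ===== LEMMAS AND PROOFS =====

-- floor division plus round-up-on-remainder equals ceiling division -((-x)//s), for any s ≠ 0
lemma ceil_eq (x s : Int) (hs : s ≠ 0) :
    (if PySem.Int.mod x s = 0 then PySem.Int.floordiv x s else PySem.Int.floordiv x s + 1)
      = -(PySem.Int.floordiv (-x) s) := by
  have h1 := PySem.Int.floordiv_mul_add_mod x s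
  have h2 := PySem.Int.floordiv_mul_add_mod (-x) s
  set q := PySem.Int.floordiv x s with hq
  set r := PySem.Int.mod x s with hr
  set q' := PySem.Int.floordiv (-x) s with hq'
  set r' := PySem.Int.mod (-x) s with hr'
  have hsum : (q + q') * s = -(r + r') := by ring_nf; linarith [h1, h2]
  rcases lt_or_gt_of_ne hs with hneg | hpos
  · have hb1 := PySem.Int.mod_neg_bounds x hneg
    have hb2 := PySem.Int.mod_neg_bounds (-x) hneg
    rw [← hr] at hb1; rw [← hr'] at hb2
    have hk1 : q + q' ≤ 0 := by nlinarith
    have hk2 : -2 < q + q' := by nlinarith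
    have hk : q + q' = 0 ∨ q + q' = -1 := by omega
    rcases hk with hk | hk <;> rw [hk] at hsum <;> split_ifs with h0 <;> omega
  · have hb1l := PySem.Int.mod_nonneg x hpos
    have hb1r := PySem.Int.mod_lt x hpos
    have hb2l := PySem.Int.mod_nonneg (-x) hpos
    have hb2r := PySem.Int.mod_lt (-x) hpos
    rw [← hr] at hb1l hb1r; rw [← hr'] at hb2l hb2r
    have hk1 : q + q' ≤ 0 := by nlinarith
    have hk2 : -2 < q + q' := by nlinarith
    have hk : q + q' = 0 ∨ q + q' = -1 := by omega
    rcases hk with hk | hk <;> rw [hk] at hsum <;> split_ifs with h0 <;> omega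

-- A's day-computation loop equals B's days list
lemma days_eq (progresses speeds : List Int)
    (hlen : progresses.length ≤ speeds.length)
    (hnz : ∀ s ∈ speeds.take progresses.length, s ≠ 0) :
    (PySem.List.pyRange 0 (progresses.length : Int) 1).foldl
      (fun tmp i =>
        let vm := (PySem.Int.divmod? (100 - PySem.List.pyGetD progresses i 0)
                    (PySem.List.pyGetD speeds i 0)).getD (0, 0)
        if vm.2 = 0 then tmp ++ [vm.1] else tmp ++ [vm.1 + 1]) []
      = daysB progresses speeds := by
  have hbody : (fun (tmp : List Int) (i : Int) =>
      let vm := (PySem.Int.divmod? (100 - PySem.List.pyGetD progresses i 0)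
                  (PySem.List.pyGetD speeds i 0)).getD (0, 0)
      if vm.2 = 0 then tmp ++ [vm.1] else tmp ++ [vm.1 + 1])
      = (fun (tmp : List Int) (i : Int) => tmp ++
        [(let vm := (PySem.Int.divmod? (100 - PySem.List.pyGetD progresses i 0)
                  (PySem.List.pyGetD speeds i 0)).getD (0, 0);
          if vm.2 = 0 then vm.1 else vm.1 + 1)]) := by
    funext tmp i
    simp only []
    split_ifs <;> rfl
  rw [hbody, PySem.List.foldl_append_singleton_eq_map, List.nil_append]
  apply List.ext_getElem
  · simp [PySem.List.length_pyRange_one, daysB]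
    omega
  · intro k hk1 hk2
    have hkn : k < progresses.length := by
      simpa [PySem.List.length_pyRange_one] using hk1
    have hks : k < speeds.length := by omega
    rw [List.getElem_map, PySem.List.getElem_pyRange_one]
    have hp : PySem.List.pyGetD progresses ((0 : Int) + (k : Int)) 0 = progresses[k] := by
      rw [zero_add, PySem.List.pyGetD_natCast]
      simp [List.getElem?_eq_getElem hkn]
    have hsv : PySem.List.pyGetD speeds ((0 : Int) + (k : Int)) 0 = speeds[k] := by
      rw [zero_add, PySem.List.pyGetD_natCast]
      simp [List.getElem?_eq_getElem hks]
    have hnz' : speeds[k] ≠ 0 := by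
      apply hnz
      rw [List.mem_take_iff_getElem]
      exact ⟨k, by omega, rfl⟩
    rw [hp, hsv]
    have hdm : PySem.Int.divmod? (100 - progresses[k]) speeds[k]
        = some (PySem.Int.floordiv (100 - progresses[k]) speeds[k],
                PySem.Int.mod (100 - progresses[k]) speeds[k]) := by
      simp [PySem.Int.divmod?, PySem.Int.floordiv, PySem.Int.mod, hnz']
    rw [hdm]
    simp only [Option.getD_some, daysB, List.getElem_map, List.getElem_zip]
    exact ceil_eq (100 - progresses[k]) speeds[k] hnz'

lemma groupB_acc (rest : List Int) (front count : Int) (acc : List Int) :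
    groupB front count rest acc = acc ++ groupB front count rest [] := by
  induction rest generalizing front count acc with
  | nil => simp [groupB]
  | cons d ds ih =>
    simp only [groupB]
    split_ifs with h
    · rw [ih, ih front]
    · rw [ih, ih d 1 ([] ++ [count])]
      simp

lemma whileLoopA_cons (v : Int) (rest : List Int) :
    whileLoopA (v :: rest) =
      ((1 + cntLoop v rest : Nat) : Int) :: whileLoopA (rest.drop (cntLoop v rest)) := by
  conv_lhs => rw [whileLoopA.eq_def]
  simp [Nat.one_add]

lemma groupB_eq_while (rest : List Int) (v c : Int) :
    groupB v c rest [] =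
      (c + (cntLoop v rest : Int)) :: whileLoopA (rest.drop (cntLoop v rest)) := by
  induction rest generalizing v c with
  | nil => simp [groupB, cntLoop, whileLoopA]
  | cons d ds ih =>
    by_cases h : d ≤ v
    · have hcnt : cntLoop v (d :: ds) = 1 + cntLoop v ds := by
        simp [cntLoop, not_lt.mpr h]
      rw [groupB, if_pos h, ih, hcnt]
      have : (d :: ds).drop (1 + cntLoop v ds) = ds.drop (cntLoop v ds) := by
        simp [Nat.add_comm 1 (cntLoop v ds)]
      rw [this]
      push_cast
      ring_nf
    · have hcnt : cntLoop v (d :: ds) = 0 := by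
        simp [cntLoop, not_le.mp h]
      rw [groupB, if_neg h, groupB_acc, ih, hcnt]
      simp [whileLoopA_cons]

-- ===== VERDICT (by name: the statement is the Claim_ definition above) =====
theorem solution_spec : Claim_equal_solution := by
  intro progresses speeds _ hpre
  obtain ⟨hlen, hnz⟩ := hpre
  show solution progresses speeds = solution_alt progresses speeds
  unfold solution solution_alt
  rw [days_eq progresses speeds hlen hnz]
  cases hdb : daysB progresses speeds with
  | nil => simp [whileLoopA]
  | cons f rest =>
    show whileLoopA (f :: rest) = groupB f 1 rest []
    rw [whileLoopA_cons, groupB_eq_while]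
    simp
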